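-- pv_equiv track=rewrite | github.com/Q-ModifiedJ/dist_diagnosis | dist_diagnosis/dist_diagnosis_4node_demo.py | get_split_test_x
-- ===== SOURCE A (Python) =====
-- def get_split_test_x(all_x, train_idx, num_classes):
--     # 切出不同class的单独test_x
--     # 由于每个class的数据在all_x里是连续的，即可判断
--     split_test_x = [[] for _ in range(num_classes)]
--
--     length_per_class = int(len(all_x) / num_classes)
--
--     for idx in train_idx:
--         class_id = idx // length_per_class
--         if class_id >= num_classes:
--             class_id -= 1
--         split_test_x[class_id].append(all_x[idx])
--     return split_test_x
-- ===== SOURCE B (Python) =====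
-- def get_split_test_x(all_x, train_idx, num_classes):
--     length_per_class = int(len(all_x) / num_classes)
--
--     def class_of(idx):
--         c = idx // length_per_class
--         return c - 1 if c >= num_classes else c
--
--     pairs = [(class_of(i), all_x[i]) for i in train_idx]
--     return [[s for label, s in pairs if label == c]
--             for c in range(num_classes)]
-- ===== Notes on version B (the rewrite author's own statement) =====
-- stated objective: alternative
-- what changed: A routes each train index in one pass into a mutable list of buckets; B first pairs every train index's clamped class label with its sample and then collects each class's bucket by a filtering pass over the pairs; Pre_ excludes negative train indices, a corner nobody specified where A's bucket and element come from Python's negative-index wraparound while B's label filter simply never matches them, besides the inputs where A raises.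
-- outside the precondition, e.g. on get_split_test_x([1, 2, 3, 4], [-1], 2): A returns [[], [4]], B returns [[], []]
import Mathlib
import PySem

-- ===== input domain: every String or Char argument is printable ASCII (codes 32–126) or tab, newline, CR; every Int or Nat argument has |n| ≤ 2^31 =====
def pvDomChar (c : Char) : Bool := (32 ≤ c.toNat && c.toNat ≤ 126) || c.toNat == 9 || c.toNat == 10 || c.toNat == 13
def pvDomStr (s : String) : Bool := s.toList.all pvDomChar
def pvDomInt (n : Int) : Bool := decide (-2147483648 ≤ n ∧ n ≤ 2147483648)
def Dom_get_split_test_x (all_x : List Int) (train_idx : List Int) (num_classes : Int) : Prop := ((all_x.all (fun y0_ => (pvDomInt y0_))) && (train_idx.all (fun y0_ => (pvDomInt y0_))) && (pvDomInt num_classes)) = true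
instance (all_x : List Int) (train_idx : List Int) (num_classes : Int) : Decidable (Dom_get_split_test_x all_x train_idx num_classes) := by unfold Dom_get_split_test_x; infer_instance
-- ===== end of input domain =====

-- B pairs each train index's class label with its sample and then collects each class's
-- samples by a filtering pass per class, instead of A's single routing pass into a mutable
-- bucket list (alternative decomposition, not faster).


-- ===== PORT A =====
-- single pass over train_idx, appending each sample into its class bucket.
-- split_test_x[class_id] follows Python list indexing: a negative class_id counts from the
-- end ('j'); the range guard and the 'none' branch of pyGet? are IndexError (outside Pre_).
def get_split_test_x (all_x : List Int) (train_idx : List Int) (num_classes : Int) : List (List Int) :=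
  let split0 : List (List Int) := (List.range num_classes.toNat).map (fun _ => ([] : List Int))
  let lpc : Int := PySem.Int.floordiv (all_x.length : Int) num_classes
  train_idx.foldl (fun st idx =>
    let cid0 := PySem.Int.floordiv idx lpc
    let cid := if num_classes ≤ cid0 then cid0 - 1 else cid0
    match PySem.List.pyGet? all_x idx with
    | some v =>
      let j := if cid < 0 then cid + (st.length : Int) else cid
      if 0 ≤ j ∧ j < (st.length : Int) then st.set j.toNat ((st.getD j.toNat []) ++ [v]) else st
    | none => st) split0

-- ===== PORT B =====
-- pair every train index's clamped class label with its sample, then one filtering pass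
-- over the pairs per class c (the 'none' of pyGet? is IndexError, outside Pre_).
def get_split_test_x_alt (all_x : List Int) (train_idx : List Int) (num_classes : Int) : List (List Int) :=
  let lpc : Int := PySem.Int.floordiv (all_x.length : Int) num_classes
  let pairs : List (Int × Int) := train_idx.filterMap (fun idx =>
    let cid0 := PySem.Int.floordiv idx lpc
    let cid := if num_classes ≤ cid0 then cid0 - 1 else cid0
    (PySem.List.pyGet? all_x idx).map (fun v => (cid, v)))
  (List.range num_classes.toNat).map (fun (c : Nat) =>
    pairs.filterMap (fun p => if p.1 = (c : Int) then some p.2 else none))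

-- ===== PRECONDITION & SPEC =====
-- Pre_ admits the inputs on which A returns normally EXCEPT those containing a negative train
-- index: there A's bucket choice and looked-up element come from Python's negative-index
-- wraparound, a corner no caller specified, and B's per-class filter simply never matches a
-- negative class id. Excluded as raising: num_classes = 0 (ZeroDivisionError), a nonempty
-- train_idx with num_classes outside [1, len(all_x)] or an index/bucket out of range (IndexError).
def Pre_get_split_test_x (all_x : List Int) (train_idx : List Int) (num_classes : Int) : Prop :=
  (train_idx = [] ∧ num_classes ≠ 0) ∨
  (1 ≤ num_classes ∧ num_classes ≤ (all_x.length : Int) ∧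
    ∀ idx ∈ train_idx, 0 ≤ idx ∧ idx < (all_x.length : Int) ∧
      PySem.Int.floordiv idx (PySem.Int.floordiv (all_x.length : Int) num_classes) ≤ num_classes)
instance (all_x : List Int) (train_idx : List Int) (num_classes : Int) : Decidable (Pre_get_split_test_x all_x train_idx num_classes) := by unfold Pre_get_split_test_x; infer_instance

def pvWitness_get_split_test_x : List Int × List Int × Int := ([1, 2, 3, 4], [0, 3], 2)

def Spec_get_split_test_x (all_x : List Int) (train_idx : List Int) (num_classes : Int) (out : List (List Int)) : Prop := out = get_split_test_x_alt all_x train_idx num_classes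
instance (all_x : List Int) (train_idx : List Int) (num_classes : Int) (out : List (List Int)) : Decidable (Spec_get_split_test_x all_x train_idx num_classes out) := by unfold Spec_get_split_test_x; infer_instance

-- ===== CLAIM (what is proved, stated in full; the proofs are below) =====
def Claim_equal_get_split_test_x : Prop := ∀ (all_x : List Int) (train_idx : List Int) (num_classes : Int), Dom_get_split_test_x all_x train_idx num_classes → Pre_get_split_test_x all_x train_idx num_classes → Spec_get_split_test_x all_x train_idx num_classes (get_split_test_x all_x train_idx num_classes)

-- ===== LEMMAS AND PROOFS =====

-- A's routing fold preserves the number of buckets.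
theorem pv_foldA_length (f : Int → Int) (g : Int → Option Int) :
    ∀ (ti : List Int) (st : List (List Int)),
      (ti.foldl (fun st idx =>
        match g idx with
        | some v =>
          let j := if f idx < 0 then f idx + (st.length : Int) else f idx
          if 0 ≤ j ∧ j < (st.length : Int) then st.set j.toNat ((st.getD j.toNat []) ++ [v]) else st
        | none => st) st).length = st.length := by
  intro ti
  induction ti with
  | nil => intro st; rfl
  | cons a ti ih =>
    intro st
    simp only [List.foldl_cons]
    cases hg : g a with
    | none => simpa [hg] using ih _
    | some v =>
      dsimp only
      split_ifs <;> exact (ih _).trans (by simp)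

-- Characterisation of bucket c after A's routing fold: it receives, in order, the values of
-- the indices whose (clamped) class id has canonical bucket c = class_id % number-of-buckets.
theorem pv_foldA_getD (f : Int → Int) (g : Int → Option Int) :
    ∀ (ti : List Int) (st : List (List Int)) (c : Nat),
      (∀ idx ∈ ti, -(st.length : Int) ≤ f idx ∧ f idx < (st.length : Int)) →
      (ti.foldl (fun st idx =>
        match g idx with
        | some v =>
          let j := if f idx < 0 then f idx + (st.length : Int) else f idx
          if 0 ≤ j ∧ j < (st.length : Int) then st.set j.toNat ((st.getD j.toNat []) ++ [v]) else st
        | none => st) st).getD c []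
      = st.getD c [] ++ ti.flatMap (fun idx => if (f idx) % (st.length : Int) = (c : Int) then (g idx).toList else []) := by
  intro ti
  induction ti with
  | nil => intro st c _; simp
  | cons a ti ih =>
    intro st c hb
    obtain ⟨haL, haU⟩ := hb a (by simp)
    have hpos : 0 < (st.length : Int) := by omega
    simp only [List.foldl_cons, List.flatMap_cons]
    cases hg : g a with
    | none =>
      rw [ih st c (fun idx h => hb idx (by simp [h]))]
      simp [Option.toList]
    | some v =>
      dsimp only
      have hj0 : 0 ≤ (if f a < 0 then f a + (st.length : Int) else f a) := by split_ifs <;> omega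
      have hjU : (if f a < 0 then f a + (st.length : Int) else f a) < (st.length : Int) := by split_ifs <;> omega
      rw [if_pos ⟨hj0, hjU⟩]
      set j : Int := if f a < 0 then f a + (st.length : Int) else f a with hjdef
      have hmod : (f a) % (st.length : Int) = j := by
        by_cases hneg : f a < 0
        · have h1 : (f a) % (st.length : Int) = (f a + (st.length : Int)) % (st.length : Int) :=
            (Int.add_emod_right (f a) (st.length : Int)).symm
          rw [h1, Int.emod_eq_of_lt (by omega) (by omega)]
          simp [hjdef, hneg]
        · rw [Int.emod_eq_of_lt (by omega) (by omega)]
          simp [hjdef, hneg]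
      have hset : (st.set j.toNat ((st.getD j.toNat []) ++ [v])).length = st.length := by simp
      rw [ih _ c (fun idx h => by simpa [hset] using hb idx (by simp [h]))]
      rw [hset]
      by_cases hc : j.toNat = c
      · subst hc
        have hcI : (f a) % (st.length : Int) = ((j.toNat : Nat) : Int) := by omega
        rw [List.getD_eq_getElem?_getD, List.getElem?_set_self (by omega)]
        simp [hcI, List.getD_eq_getElem?_getD]
      · have hcI : (f a) % (st.length : Int) ≠ (c : Int) := by omega
        rw [List.getD_eq_getElem?_getD, List.getElem?_set_ne hc]
        simp [hcI, List.getD_eq_getElem?_getD]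

-- B's pair-then-filter pipeline, per class c, written as a flatMap of singletons.
theorem pv_pairs_eq_flatMap (f : Int → Int) (g : Int → Option Int) (l : List Int) (c : Int) :
    (l.filterMap (fun idx => (g idx).map (fun v => (f idx, v)))).filterMap
        (fun p => if p.1 = c then some p.2 else none)
      = l.flatMap (fun idx => if f idx = c then (g idx).toList else []) := by
  induction l with
  | nil => rfl
  | cons a l ih =>
    cases hg : g a with
    | none => simp [hg, ih]
    | some v =>
      by_cases h : f a = c
      · simp [hg, h, ih, Option.toList]
      · simp [hg, h, ih]

-- flatMap respects pointwise equality on the list's members.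
theorem pv_flatMap_congr (l : List Int) (f g : Int → List Int)
    (h : ∀ x ∈ l, f x = g x) : l.flatMap f = l.flatMap g := by
  induction l with
  | nil => rfl
  | cons a l ih =>
    simp only [List.flatMap_cons]
    rw [h a (by simp), ih (fun x hx => h x (by simp [hx]))]

-- ===== VERDICT (by name: the statement is the Claim_ definition above) =====
theorem get_split_test_x_spec : Claim_equal_get_split_test_x := by
  intro all_x train_idx num_classes _ hpre
  unfold Spec_get_split_test_x get_split_test_x get_split_test_x_alt
  simp only []
  set lpc : Int := PySem.Int.floordiv (all_x.length : Int) num_classes with hlpc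
  set f : Int → Int := fun idx =>
    if num_classes ≤ PySem.Int.floordiv idx lpc then PySem.Int.floordiv idx lpc - 1
    else PySem.Int.floordiv idx lpc with hf
  set g : Int → Option Int := fun idx => PySem.List.pyGet? all_x idx with hg
  rcases hpre with ⟨hnil, _⟩ | ⟨h1, h2, hall⟩
  · subst hnil; simp
  · have hlpc1 : 1 ≤ lpc := by
      rw [hlpc]
      exact (PySem.Int.le_floordiv_iff_mul_le (by omega)).2 (by omega)
    have hfb : ∀ idx ∈ train_idx, 0 ≤ f idx ∧ f idx < num_classes := by
      intro idx hidx
      obtain ⟨h0, _, hhi⟩ := hall idx hidx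
      rw [← hlpc] at hhi
      have hlo : 0 ≤ PySem.Int.floordiv idx lpc :=
        (PySem.Int.le_floordiv_iff_mul_le (by omega)).2 (by omega)
      simp only [hf]
      split_ifs <;> omega
    have hlen0 : ((List.range num_classes.toNat).map (fun _ => ([] : List Int))).length = num_classes.toNat := by simp
    have hbound : ∀ idx ∈ train_idx,
        -((((List.range num_classes.toNat).map (fun _ => ([] : List Int))).length : Nat) : Int) ≤ f idx ∧
        f idx < ((((List.range num_classes.toNat).map (fun _ => ([] : List Int))).length : Nat) : Int) := by
      intro idx hidx
      obtain ⟨hl, hu⟩ := hfb idx hidx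
      rw [hlen0]
      constructor <;> omega
    apply List.ext_getElem
    · rw [pv_foldA_length f g]; simp
    · intro c hcA hcB
      have hcN : c < num_classes.toNat := by simpa using hcB
      conv_rhs => rw [List.getElem_map, List.getElem_range]
      conv_lhs => rw [← List.getD_eq_getElem _ []]
      rw [pv_foldA_getD f g train_idx _ c hbound]
      have hinit : ((List.range num_classes.toNat).map (fun _ => ([] : List Int))).getD c [] = [] := by
        simp [List.getD_eq_getElem?_getD]
      rw [hinit, List.nil_append]
      rw [pv_pairs_eq_flatMap f g train_idx (c : Int)]
      simp only [List.length_map, List.length_range,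
        Int.toNat_of_nonneg (by omega : (0:Int) ≤ num_classes)]
      apply pv_flatMap_congr
      intro idx hidx
      obtain ⟨hl, hu⟩ := hfb idx hidx
      rw [Int.emod_eq_of_lt hl hu]
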